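-- pv_equiv track=rewrite | github.com/SystemLight/madtornado | madtornado/ancient/rig/iso7064.py | iso7064mod37_2
-- ===== SOURCE A (Python) =====
-- def iso7064mod37_2(source: str) -> str:
--     """
--
--     iso7064mod37_2校验算法
--
--     :param source: 需要添加校验的字符串
--     :return: 校验位
--
--     """
--     alphabet = "0123456789ABCDEFGHIJKLMNOPQRSTUVWXYZ*"
--     sigma = 0
--     index = 0
--     size = len(source)
--     for i in source:
--         weight = (2 ** (size - index)) % 37
--         sigma += (ord(i) - 48) * weight
--         index += 1
--     sigma %= 37
--     sigma = ((38 - sigma) % 37)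
--     return alphabet[sigma]
-- ===== SOURCE B (Python) =====
-- def iso7064mod37_2(source: str) -> str:
--     """ISO 7064 MOD 37,2 check character, computed Horner-style with the
--     running value kept reduced mod 37 (no bignum powers)."""
--     alphabet = "0123456789ABCDEFGHIJKLMNOPQRSTUVWXYZ*"
--     s = 0
--     for c in source:
--         s = ((s + ord(c) - 48) * 2) % 37
--     return alphabet[(38 - s) % 37]
-- ===== Notes on version B (the rewrite author's own statement) =====
-- stated objective: faster
-- what changed: Replaces the per-character full bignum power 2**(size-index) (quadratic-bit-cost) with a single Horner-style pass that keeps the running checksum reduced mod 37.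
import Mathlib
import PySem

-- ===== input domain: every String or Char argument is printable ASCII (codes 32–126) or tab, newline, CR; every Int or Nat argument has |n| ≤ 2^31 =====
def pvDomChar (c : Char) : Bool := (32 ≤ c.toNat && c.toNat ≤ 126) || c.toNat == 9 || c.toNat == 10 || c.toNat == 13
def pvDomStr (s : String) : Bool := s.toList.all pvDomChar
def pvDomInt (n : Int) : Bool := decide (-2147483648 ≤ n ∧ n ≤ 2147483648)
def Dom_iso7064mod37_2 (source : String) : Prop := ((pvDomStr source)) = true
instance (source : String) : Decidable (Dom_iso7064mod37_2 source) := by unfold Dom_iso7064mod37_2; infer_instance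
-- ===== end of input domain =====

-- B replaces A's per-character full power 2**(size-index) with one Horner pass kept reduced mod 37 (faster).


-- ===== PORT A =====
def iso7064mod37_2 (source : String) : String :=
  let alphabet := "0123456789ABCDEFGHIJKLMNOPQRSTUVWXYZ*"
  let size := source.toList.length
  let st := source.toList.foldl (fun (st : Int × Nat) i =>
      let weight := PySem.Int.mod ((2 : Int) ^ (size - st.2)) 37
      (st.1 + (((i.toNat : Int)) - 48) * weight, st.2 + 1)) (0, 0)
  let sigma := PySem.Int.mod st.1 37
  let sigma := PySem.Int.mod (38 - sigma) 37
  ((PySem.Str.pyGet? alphabet sigma).map (fun c => String.mk [c])).getD ""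

-- ===== PORT B =====
def iso7064mod37_2_alt (source : String) : String :=
  let alphabet := "0123456789ABCDEFGHIJKLMNOPQRSTUVWXYZ*"
  let s := source.toList.foldl (fun (s : Int) c =>
      PySem.Int.mod ((s + ((c.toNat : Int) - 48)) * 2) 37) 0
  ((PySem.Str.pyGet? alphabet (PySem.Int.mod (38 - s) 37)).map (fun c => String.mk [c])).getD ""

-- ===== PRECONDITION & SPEC =====
def Spec_iso7064mod37_2 (source : String) (out : String) : Prop := out = iso7064mod37_2_alt source
instance (source : String) (out : String) : Decidable (Spec_iso7064mod37_2 source out) := by unfold Spec_iso7064mod37_2; infer_instance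

-- ===== CLAIM (what is proved, stated in full; the proofs are below) =====
def Claim_equal_iso7064mod37_2 : Prop := ∀ (source : String), Dom_iso7064mod37_2 source → Spec_iso7064mod37_2 source (iso7064mod37_2 source)

-- ===== LEMMAS AND PROOFS =====

/-- Exact weighted checksum Σ (ord cᵢ - 48) · 2^(n-i) of a character list. -/
def pvWSum : List Char → Int
  | [] => 0
  | c :: l => (((c.toNat : Int)) - 48) * 2 ^ (l.length + 1) + pvWSum l

theorem pvFoldA_eq (l : List Char) : ∀ (sigma : Int) (idx size : Nat), idx + l.length = size →
    (l.foldl (fun (st : Int × Nat) i =>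
      (st.1 + (((i.toNat : Int)) - 48) * (((2 : Int) ^ (size - st.2)) % 37), st.2 + 1)) (sigma, idx)).1 % 37
    = (sigma + pvWSum l) % 37 := by
  induction l with
  | nil => intro sigma idx size h; simp [pvWSum]
  | cons c l ih =>
    intro sigma idx size h
    simp only [List.foldl_cons]
    have hk : size - idx = l.length + 1 := by simp at h; omega
    rw [hk, ih _ (idx + 1) size (by simp at h ⊢; omega)]
    simp only [pvWSum]
    have hm : ((2 : Int) ^ (l.length + 1) % 37) ≡ (2 : Int) ^ (l.length + 1) [ZMOD 37] :=
      Int.emod_emod_of_dvd _ dvd_rfl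
    have := ((hm.mul_left (((c.toNat : Int)) - 48)).add_left sigma).add_right (pvWSum l)
    calc (sigma + ((c.toNat : Int) - 48) * ((2:Int) ^ (l.length + 1) % 37) + pvWSum l) % 37
        = (sigma + ((c.toNat : Int) - 48) * (2:Int) ^ (l.length + 1) + pvWSum l) % 37 := this
      _ = (sigma + (((c.toNat : Int) - 48) * 2 ^ (l.length + 1) + pvWSum l)) % 37 := by ring_nf

theorem pvFoldB_eq (l : List Char) : ∀ (acc : Int),
    (l.foldl (fun (s : Int) c => ((s + ((c.toNat : Int) - 48)) * 2) % 37) acc) % 37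
    = (acc * 2 ^ l.length + pvWSum l) % 37 := by
  induction l with
  | nil => intro acc; simp [pvWSum]
  | cons c l ih =>
    intro acc
    simp only [List.foldl_cons]
    rw [ih]
    have hm : (((acc + ((c.toNat : Int) - 48)) * 2) % 37) ≡ (acc + ((c.toNat : Int) - 48)) * 2 [ZMOD 37] :=
      Int.emod_emod_of_dvd _ dvd_rfl
    have := (hm.mul_right ((2:Int) ^ l.length)).add_right (pvWSum l)
    calc ((acc + ((c.toNat:Int) - 48)) * 2 % 37 * 2 ^ l.length + pvWSum l) % 37
        = ((acc + ((c.toNat:Int) - 48)) * 2 * 2 ^ l.length + pvWSum l) % 37 := this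
      _ = (acc * 2 ^ (l.length + 1) + (((c.toNat:Int) - 48) * 2 ^ (l.length + 1) + pvWSum l)) % 37 := by
          ring_nf

theorem pvFoldB_norm (l : List Char) : ∀ (acc : Int), acc % 37 = acc →
    (l.foldl (fun (s : Int) c => ((s + ((c.toNat : Int) - 48)) * 2) % 37) acc) % 37
    = l.foldl (fun (s : Int) c => ((s + ((c.toNat : Int) - 48)) * 2) % 37) acc := by
  induction l with
  | nil => intro acc h; exact h
  | cons c l ih =>
    intro acc h
    simp only [List.foldl_cons]
    exact ih _ (Int.emod_emod_of_dvd _ dvd_rfl)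

-- ===== VERDICT (by name: the statement is the Claim_ definition above) =====
theorem iso7064mod37_2_spec : Claim_equal_iso7064mod37_2 := by
  intro source _
  unfold Spec_iso7064mod37_2 iso7064mod37_2 iso7064mod37_2_alt
  simp only [PySem.Int.mod_eq_emod_of_pos (by norm_num : (0:Int) < 37)]
  have hA := pvFoldA_eq source.toList 0 0 source.toList.length (by omega)
  have hB := pvFoldB_eq source.toList 0
  have hBn := pvFoldB_norm source.toList 0 rfl
  simp only [zero_add, zero_mul] at hA hB
  rw [hA, ← hB, hBn]
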